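-- pv_equiv track=rewrite | github.com/dangquan1402/research-flow | experiments/tokenizer.py | compute_input_position_ids
-- ===== SOURCE A (Python) =====
-- PC_BOS_POS = 0
--
-- PC_OP_POS = 1
--
-- PC_EQ_POS = 2
--
-- PC_DIGIT_BASE = 4  # Digit significance s → position ID PC_DIGIT_BASE + s
--
-- def compute_input_position_ids(inp_str):
--     """Compute position IDs for input-only string (for autoregressive eval).
--
--     inp_str looks like "123+456=" (includes trailing =).
--     Returns position IDs including BOS at the start.
--     """
--     op_idx = next(i for i, c in enumerate(inp_str) if c in "+-*")
--     # eq_idx is the last char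
--     op1 = inp_str[:op_idx]
--     op2 = inp_str[op_idx + 1 : -1]  # exclude trailing '='
--
--     pos_ids = [PC_BOS_POS]
--
--     for i in range(len(op1)):
--         pos_ids.append(PC_DIGIT_BASE + len(op1) - 1 - i)
--
--     pos_ids.append(PC_OP_POS)
--
--     for i in range(len(op2)):
--         pos_ids.append(PC_DIGIT_BASE + len(op2) - 1 - i)
--
--     pos_ids.append(PC_EQ_POS)
--
--     return pos_ids
-- ===== SOURCE B (Python) =====
-- PC_BOS_POS = 0
--
-- PC_OP_POS = 1
--
-- PC_EQ_POS = 2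
--
-- PC_DIGIT_BASE = 4
--
--
-- def compute_input_position_ids(inp_str):
--     """Single positional pass: classify every index of inp_str directly."""
--     op_idx = next(i for i, c in enumerate(inp_str) if c in "+-*")
--     eq_idx = len(inp_str) - 1
--     pos_ids = [PC_BOS_POS]
--     for i in range(len(inp_str)):
--         if i == op_idx:
--             pos_ids.append(PC_OP_POS)
--         elif i == eq_idx:
--             pos_ids.append(PC_EQ_POS)
--         elif i < op_idx:
--             pos_ids.append(PC_DIGIT_BASE + op_idx - 1 - i)
--         else:
--             pos_ids.append(PC_DIGIT_BASE + len(inp_str) - 2 - i)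
--     return pos_ids
-- ===== Notes on version B (the rewrite author's own statement) =====
-- stated objective: alternative
-- what changed: Replaces A's substring splitting (slice out op1/op2 and run two separate operand loops) by a single positional pass over the whole string that classifies each index (operator / last char / digit significance) directly.
-- intended difference: On strings whose first operator character is also the last character of the string (so there is no equals sign or second operand after it), A blindly appends an operator id AND a final equals-position id, returning len+2 ids for len characters, while B returns exactly one id per character plus BOS; B's aligned labelling is the intended one. — e.g. on compute_input_position_ids("12+"): A returns [0, 5, 4, 1, 2], B returns [0, 5, 4, 1]
import Mathlib
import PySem

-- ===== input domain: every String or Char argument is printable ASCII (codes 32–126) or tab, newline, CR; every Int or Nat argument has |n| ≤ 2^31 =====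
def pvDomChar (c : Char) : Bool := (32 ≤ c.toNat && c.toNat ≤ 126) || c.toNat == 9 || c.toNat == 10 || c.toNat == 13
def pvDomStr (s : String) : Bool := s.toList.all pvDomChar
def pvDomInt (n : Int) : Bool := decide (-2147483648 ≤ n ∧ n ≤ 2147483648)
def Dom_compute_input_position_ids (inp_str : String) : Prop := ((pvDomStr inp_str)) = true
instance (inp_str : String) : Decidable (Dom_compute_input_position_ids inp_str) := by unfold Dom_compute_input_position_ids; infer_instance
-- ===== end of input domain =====

-- B replaces A's substring splitting (two operand slices, two separate loops) by one positional
-- pass classifying every index of the string directly (objective: alternative decomposition).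

def PC_BOS_POS : Int := 0
def PC_OP_POS : Int := 1
def PC_EQ_POS : Int := 2
def PC_DIGIT_BASE : Int := 4

-- c in "+-*"
def pvIsOp (c : Char) : Bool := c == '+' || c == '-' || c == '*'

-- ===== PORT A =====
-- next(i for i, c in enumerate(inp_str) if c in "+-*") is the first index whose char is in "+-*"
-- (List.findIdx?); none = StopIteration, excluded by Pre_, port returns [] there.
def compute_input_position_ids (inp_str : String) : List Int :=
  let cs := inp_str.toList
  match cs.findIdx? pvIsOp with
  | none => []
  | some op_idx =>
    let op1 := PySem.List.slice cs none (some (op_idx : Int))          -- inp_str[:op_idx]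
    let op2 := PySem.List.slice cs (some ((op_idx : Int) + 1)) (some (-1))  -- inp_str[op_idx+1:-1]
    let pos_ids : List Int := [PC_BOS_POS]
    let pos_ids := (List.range op1.length).foldl
      (fun acc (i : Nat) => acc ++ [PC_DIGIT_BASE + (op1.length : Int) - 1 - (i : Int)]) pos_ids
    let pos_ids := pos_ids ++ [PC_OP_POS]
    let pos_ids := (List.range op2.length).foldl
      (fun acc (i : Nat) => acc ++ [PC_DIGIT_BASE + (op2.length : Int) - 1 - (i : Int)]) pos_ids
    pos_ids ++ [PC_EQ_POS]

-- ===== PORT B =====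
def compute_input_position_ids_alt (inp_str : String) : List Int :=
  let cs := inp_str.toList
  match cs.findIdx? pvIsOp with
  | none => []
  | some op_idx =>
    let eq_idx := cs.length - 1
    PC_BOS_POS :: (List.range cs.length).map (fun i =>
      if i = op_idx then PC_OP_POS
      else if i = eq_idx then PC_EQ_POS
      else if i < op_idx then PC_DIGIT_BASE + (op_idx : Int) - 1 - (i : Int)
      else PC_DIGIT_BASE + (cs.length : Int) - 2 - (i : Int))

-- ===== PRECONDITION & SPEC =====
-- Pre_ excludes exactly the strings containing no operator character, on which A's next(…) raises StopIteration.
def Pre_compute_input_position_ids (inp_str : String) : Prop :=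
  inp_str.toList.any pvIsOp = true
instance (inp_str : String) : Decidable (Pre_compute_input_position_ids inp_str) := by
  unfold Pre_compute_input_position_ids; infer_instance
def pvWitness_compute_input_position_ids : String := "123+456="

-- On strings whose first operator character is also the last character of the string (so there is
-- no equals sign or second operand after it), A blindly appends an operator id AND a final
-- equals-position id, returning len+2 ids for len characters, while B returns exactly one id per
-- character plus BOS; B's aligned labelling is the intended one.
def D_compute_input_position_ids (inp_str : String) : Prop :=
  inp_str.toList.findIdx? pvIsOp = some (inp_str.toList.length - 1)
instance (inp_str : String) : Decidable (D_compute_input_position_ids inp_str) := by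
  unfold D_compute_input_position_ids; infer_instance

def Spec_compute_input_position_ids (inp_str : String) (out : List Int) : Prop :=
  ¬ D_compute_input_position_ids inp_str → out = compute_input_position_ids_alt inp_str
instance (inp_str : String) (out : List Int) : Decidable (Spec_compute_input_position_ids inp_str out) := by
  unfold Spec_compute_input_position_ids; infer_instance

def pvDiffWitness_compute_input_position_ids : String := "12+"
def pvDiffWitnessOut_compute_input_position_ids : (List Int) × (List Int) :=
  ([0, 5, 4, 1, 2], [0, 5, 4, 1])

-- ===== CLAIM (what is proved, stated in full; the proofs are below) =====
def Claim_unchanged_compute_input_position_ids : Prop := ∀ (inp_str : String), Dom_compute_input_position_ids inp_str → Pre_compute_input_position_ids inp_str → Spec_compute_input_position_ids inp_str (compute_input_position_ids inp_str)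
def Claim_changed_compute_input_position_ids : Prop := Dom_compute_input_position_ids (pvDiffWitness_compute_input_position_ids) ∧ Pre_compute_input_position_ids (pvDiffWitness_compute_input_position_ids) ∧ D_compute_input_position_ids (pvDiffWitness_compute_input_position_ids) ∧ compute_input_position_ids (pvDiffWitness_compute_input_position_ids) = pvDiffWitnessOut_compute_input_position_ids.1 ∧ compute_input_position_ids_alt (pvDiffWitness_compute_input_position_ids) = pvDiffWitnessOut_compute_input_position_ids.2 ∧ pvDiffWitnessOut_compute_input_position_ids.1 ≠ pvDiffWitnessOut_compute_input_position_ids.2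
def Claim_exact_compute_input_position_ids : Prop := ∀ (inp_str : String), Dom_compute_input_position_ids inp_str → Pre_compute_input_position_ids inp_str → D_compute_input_position_ids inp_str → compute_input_position_ids inp_str ≠ compute_input_position_ids_alt inp_str

-- ===== LEMMAS AND PROOFS =====

theorem compute_input_position_ids_spec : Claim_unchanged_compute_input_position_ids := by
  intro s _ hpre
  unfold Spec_compute_input_position_ids
  intro hnd
  obtain ⟨a, h⟩ : ∃ a, s.toList.findIdx? pvIsOp = some a := by
    rw [← Option.isSome_iff_exists, List.findIdx?_isSome]
    exact hpre
  have ha : a < s.toList.length := (List.findIdx?_eq_some_iff_findIdx_eq.mp h).1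
  have hne : a ≠ s.toList.length - 1 := by
    intro hEq
    exact hnd (by unfold D_compute_input_position_ids; rw [← hEq]; exact h)
  have hlen : s.toList.length = a + 1 + (s.toList.length - (a + 2)) + 1 := by omega
  set b := s.toList.length - (a + 2) with hb
  have hl1 : (PySem.List.slice s.toList none (some (a : Int))).length = a := by
    rw [PySem.List.slice_to_natCast s.toList a, List.length_take]; omega
  have hl2 : (PySem.List.slice s.toList (some ((a : Int) + 1)) (some (-1))).length = b := by
    have hc : ((a : Int) + 1) = ((a + 1 : Nat) : Int) := by push_cast; ring
    rw [hc, PySem.List.length_slice, PySem.List.clampIdx_neg_one, PySem.List.clampIdx_natCast]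
    omega
  simp only [compute_input_position_ids, compute_input_position_ids_alt, h,
    PC_BOS_POS, PC_OP_POS, PC_EQ_POS, PC_DIGIT_BASE,
    PySem.List.foldl_append_singleton_eq_map, hl1, hl2]
  rw [hlen]
  have hsplit : a + 1 + b + 1 = (a + 1) + (b + 1) := by omega
  rw [hsplit, List.range_add, List.range_succ, List.range_succ]
  simp only [List.map_append, List.map_map, List.map_cons, List.map_nil]
  symm
  rw [List.map_congr_left (l := List.range a)
      (g := fun i : Nat => (4:Int) + (a : Int) - 1 - (i:Int)) ?_,
     List.map_congr_left (l := List.range b)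
      (g := fun i : Nat => (4:Int) + (b : Int) - 1 - (i:Int)) ?_]
  · have e1 : ¬ (a + 1 + b < a) := by omega
    have e2 : a + 1 + (b + 1) - 1 = a + 1 + b := by omega
    simp only [e2, Nat.lt_irrefl, if_false, if_neg e1, List.append_assoc,
      List.cons_append, List.nil_append]
    have t2 : ¬ (a + 1 + b = a) := by omega
    simp [t2]
  · intro i hi
    simp only [List.mem_range] at hi
    simp only [Function.comp_apply]
    split_ifs <;> omega
  · intro i hi
    simp only [List.mem_range] at hi
    beta_reduce
    split_ifs <;> omega

-- ===== VERDICT (by name: the statement is the Claim_ definition above) =====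
theorem compute_input_position_ids_changed : Claim_changed_compute_input_position_ids := by
  unfold Claim_changed_compute_input_position_ids; decide

theorem compute_input_position_ids_tight : Claim_exact_compute_input_position_ids := by
  intro s _ _ hD hEq
  unfold D_compute_input_position_ids at hD
  have ha : s.toList.length - 1 < s.toList.length := (List.findIdx?_eq_some_iff_findIdx_eq.mp hD).1
  have hlen1 : 1 <= s.toList.length := by omega
  have hl1 : (PySem.List.slice s.toList none (some ((s.toList.length - 1 : Nat) : Int))).length
      = s.toList.length - 1 := by
    rw [PySem.List.slice_to_natCast, List.length_take]; omega
  have hl2 : (PySem.List.slice s.toList (some (((s.toList.length - 1 : Nat) : Int) + 1)) (some (-1))).length = 0 := by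
    have hc : (((s.toList.length - 1 : Nat) : Int) + 1) = ((s.toList.length : Nat) : Int) := by
      push_cast [hlen1]; ring
    rw [hc, PySem.List.length_slice, PySem.List.clampIdx_neg_one, PySem.List.clampIdx_natCast]
    omega
  have hlenEq := congrArg List.length hEq
  simp only [compute_input_position_ids, compute_input_position_ids_alt, hD,
    PySem.List.foldl_append_singleton_eq_map, hl1, hl2,
    List.length_append, List.length_map, List.length_range, List.length_cons,
    List.length_nil] at hlenEq
  omega
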